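-- pv_equiv track=rewrite | github.com/Thejshri-A/Python-1000 | 338. Reverse Only Vowels.py | reverse_only_vowels
-- ===== SOURCE A (Python) =====
-- def reverse_only_vowels(s):
--     vowels = "aeiouAEIOU"
--     left, right = 0, len(s)-1
--     s=list(s)
--
--     while left<right:
--         if s[left] in vowels and s[right] in vowels:
--             s[left], s[right] = s[right], s[left]
--             left+=1
--             right-=1
--         elif s[left] not in vowels:
--             left+=1
--         else:
--             right-=1
--     return "".join(s)
--
-- s = "hello"
-- ===== SOURCE B (Python) =====
-- def reverse_only_vowels(s):
--     vowels = "aeiouAEIOU"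
--     stack = [c for c in s if c in vowels]
--     out = []
--     for c in s:
--         if c in vowels:
--             out.append(stack.pop())
--         else:
--             out.append(c)
--     return "".join(out)
-- ===== Notes on version B (the rewrite author's own statement) =====
-- stated objective: simpler
-- what changed: Replaces the converging two-pointer in-place swap loop with a collect-then-rebuild pass: gather the vowels once, then rebuild the string left-to-right popping vowels from the end of that list.
import Mathlib
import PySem

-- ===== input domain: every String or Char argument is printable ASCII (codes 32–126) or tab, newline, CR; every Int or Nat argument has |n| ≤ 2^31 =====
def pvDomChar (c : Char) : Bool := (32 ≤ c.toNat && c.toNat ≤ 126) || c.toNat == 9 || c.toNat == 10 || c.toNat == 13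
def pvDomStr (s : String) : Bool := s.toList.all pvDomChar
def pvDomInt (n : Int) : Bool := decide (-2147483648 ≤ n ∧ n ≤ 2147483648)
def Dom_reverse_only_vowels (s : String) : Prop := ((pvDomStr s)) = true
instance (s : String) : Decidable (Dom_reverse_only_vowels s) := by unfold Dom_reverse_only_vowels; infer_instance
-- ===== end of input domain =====

-- B replaces A's converging two-pointer swap loop with a simpler collect-then-rebuild pass
-- (gather the vowels, rebuild the string popping them from the end); same cost, no speed claim.

-- `c in "aeiouAEIOU"` (both Pythons test membership in the same literal)
def isVowel (c : Char) : Bool := ("aeiouAEIOU".toList).contains c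

-- ===== PORT A =====
-- the while loop; indices left/right are always in range when the loop runs (0 ≤ left < right ≤ len-1),
-- so pyGetD / pySetD are exact there.
def rovLoop (l : List Char) (left right : Int) : List Char :=
  if _h : left < right then
    if isVowel (PySem.List.pyGetD l left ' ') && isVowel (PySem.List.pyGetD l right ' ') then
      rovLoop (PySem.List.pySetD (PySem.List.pySetD l left (PySem.List.pyGetD l right ' '))
                 right (PySem.List.pyGetD l left ' ')) (left + 1) (right - 1)
    else if !isVowel (PySem.List.pyGetD l left ' ') then
      rovLoop l (left + 1) right
    else
      rovLoop l left (right - 1)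
  else l
termination_by (right - left).toNat
decreasing_by all_goals omega

def reverse_only_vowels (s : String) : String :=
  String.mk (rovLoop s.toList 0 ((s.toList.length : Int) - 1))

-- ===== PORT B =====
-- the for loop over the characters; `stack.pop()` removes the LAST element (never called on an
-- empty stack in Python, since the stack holds exactly the vowels of s; default is unreachable).
def rovStackLoop (cs : List Char) (stack out : List Char) : List Char :=
  match cs with
  | [] => out
  | c :: rest =>
      if isVowel c then rovStackLoop rest stack.dropLast (out ++ [stack.getLastD c])
      else rovStackLoop rest stack (out ++ [c])

def reverse_only_vowels_alt (s : String) : String :=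
  String.mk (rovStackLoop s.toList (s.toList.filter isVowel) [])

-- ===== PRECONDITION & SPEC =====
def Spec_reverse_only_vowels (s : String) (out : String) : Prop := out = reverse_only_vowels_alt s
instance (s : String) (out : String) : Decidable (Spec_reverse_only_vowels s out) := by unfold Spec_reverse_only_vowels; infer_instance

-- ===== CLAIM (what is proved, stated in full; the proofs are below) =====
def Claim_equal_reverse_only_vowels : Prop := ∀ (s : String), Dom_reverse_only_vowels s → Spec_reverse_only_vowels s (reverse_only_vowels s)

-- ===== LEMMAS AND PROOFS =====

-- canonical form: rebuild cs taking vowels from the front of vs (the reversed vowel list)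
def core (cs vs : List Char) : List Char :=
  match cs with
  | [] => []
  | c :: rest => if isVowel c then vs.headD c :: core rest vs.tail else c :: core rest vs

-- the specification value: reverse only the vowels of cs
def rv (cs : List Char) : List Char := core cs ((cs.filter isVowel).reverse)

theorem core_append (cs ds vs : List Char) :
    core (cs ++ ds) vs = core cs vs ++ core ds (vs.drop (cs.countP (isVowel ·))) := by
  induction cs generalizing vs with
  | nil => simp [core]
  | cons c rest ih =>
    by_cases h : isVowel c
    · simp only [List.cons_append, core, h, if_true, ih, List.countP_cons]
      rw [← List.drop_one, List.drop_drop]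
      simp [Nat.add_comm]
    · simp [core, h, ih, List.countP_cons]

theorem core_extend (cs vs ws : List Char) (h : cs.countP (isVowel ·) ≤ vs.length) :
    core cs (vs ++ ws) = core cs vs := by
  induction cs generalizing vs with
  | nil => simp [core]
  | cons c rest ih =>
    by_cases hv : isVowel c
    · have hne : vs ≠ [] := by
        intro e; subst e; simp [List.countP_cons, hv] at h
      obtain ⟨a, vs', rfl⟩ := List.exists_cons_of_ne_nil hne
      simp only [core, hv, if_true, List.cons_append, List.headD_cons, List.tail_cons]
      rw [ih]
      simp [List.countP_cons, hv] at h; omega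
    · simp only [core, hv, if_false, Bool.false_eq_true]
      rw [ih]
      simpa [List.countP_cons, hv] using h

theorem rv_nil : rv [] = [] := rfl

theorem rv_singleton (c : Char) : rv [c] = [c] := by
  by_cases h : isVowel c <;> simp [rv, core, h]

theorem rv_cons_nonvowel (x : Char) (cs : List Char) (h : ¬ isVowel x) :
    rv (x :: cs) = x :: rv cs := by
  simp [rv, core, h]

theorem rv_snoc_nonvowel (y : Char) (cs : List Char) (h : ¬ isVowel y) :
    rv (cs ++ [y]) = rv cs ++ [y] := by
  simp only [rv, List.filter_append, List.filter_singleton, h, Bool.false_eq_true, if_false,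
    List.append_nil, core_append]
  simp [core, h]

theorem length_filter_eq_countP (cs : List Char) :
    (cs.filter isVowel).length = cs.countP (isVowel ·) := by
  simp [List.countP_eq_length_filter]

theorem rv_both (x y : Char) (m : List Char) (hx : isVowel x) (hy : isVowel y) :
    rv (x :: m ++ [y]) = y :: rv m ++ [x] := by
  have hfil : ((x :: m ++ [y]).filter isVowel).reverse
      = y :: (m.filter isVowel).reverse ++ [x] := by
    simp [List.filter_append, hx, hy, List.filter_singleton]
  simp only [rv, hfil]
  simp only [List.cons_append, core, hx, if_true, List.headD_cons, List.tail_cons]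
  rw [core_append]
  have hlen : (m.filter isVowel).reverse.length = m.countP (isVowel ·) := by
    simp [length_filter_eq_countP]
  rw [core_extend m _ [x] (by rw [hlen])]
  have hdrop : ((m.filter isVowel).reverse ++ [x]).drop (m.countP (isVowel ·)) = [x] := by
    rw [List.drop_append_of_le_length (by rw [hlen])]
    simp [hlen]
  rw [hdrop]
  simp [core, hy, rv]

-- the two-pointer loop computes rv on the middle segment
theorem loop_eq : ∀ (n : Nat) (mid pre post : List Char), mid.length = n →
    rovLoop (pre ++ mid ++ post) (pre.length : Int) ((pre.length : Int) + (mid.length : Int) - 1)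
      = pre ++ rv mid ++ post := by
  intro n
  induction n using Nat.strong_induction_on with
  | _ n ih =>
    intro mid pre post hlen
    match mid, hlen with
    | [], hlen =>
      rw [rovLoop]
      simp [rv_nil]
    | [c], hlen =>
      rw [rovLoop]
      simp [rv_singleton]
    | x :: t, hlen =>
      rcases t.eq_nil_or_concat with rfl | ⟨m, y, rfl⟩
      · rw [rovLoop]; simp [rv_singleton]
      -- mid = x :: m ++ [y], length ≥ 2
      · simp only [List.concat_eq_append] at hlen ⊢
        have hcond : (pre.length : Int) < (pre.length : Int) + ((x :: (m ++ [y])).length : Int) - 1 := by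
          simp; omega
        have hgetx : PySem.List.pyGetD (pre ++ (x :: (m ++ [y])) ++ post) (pre.length : Int) ' ' = x := by
          have : pre ++ (x :: (m ++ [y])) ++ post = pre ++ x :: (m ++ [y] ++ post) := by simp
          rw [this, PySem.List.pyGetD_natCast]
          simp [List.getD_append_right, List.getD]
        have hridx : (pre.length : Int) + ((x :: (m ++ [y])).length : Int) - 1
            = (((pre ++ x :: m).length : Nat) : Int) := by simp; push_cast; ring
        have hgety : PySem.List.pyGetD (pre ++ (x :: (m ++ [y])) ++ post)
            ((pre.length : Int) + ((x :: (m ++ [y])).length : Int) - 1) ' ' = y := by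
          have hre : pre ++ (x :: (m ++ [y])) ++ post = (pre ++ x :: m) ++ y :: post := by simp
          rw [hridx, hre, PySem.List.pyGetD_natCast]
          simp [List.getD_append_right, List.getD]
        rw [rovLoop]
        rw [dif_pos hcond, hgetx, hgety]
        by_cases hx : isVowel x
        · by_cases hy : isVowel y
          · -- swap case
            rw [if_pos (by simp [hx, hy])]
            have hset : PySem.List.pySetD (PySem.List.pySetD
                (pre ++ (x :: (m ++ [y])) ++ post) (pre.length : Int) y)
                ((pre.length : Int) + ((x :: (m ++ [y])).length : Int) - 1) x
                = (pre ++ [y]) ++ m ++ ([x] ++ post) := by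
              have h1 : pre ++ (x :: (m ++ [y])) ++ post = pre ++ x :: (m ++ [y] ++ post) := by simp
              rw [h1, PySem.List.pySetD_natCast, List.set_append_right _ _ (le_refl _)]
              simp only [Nat.sub_self, List.set_cons_zero]
              have h2 : pre ++ y :: (m ++ [y] ++ post) = (pre ++ y :: m) ++ y :: post := by simp
              have h3 : (pre ++ x :: m).length = (pre ++ y :: m).length := by simp
              rw [h2, hridx, h3, PySem.List.pySetD_natCast,
                List.set_append_right _ _ (le_refl _)]
              simp
            rw [hset]
            have harg1 : (pre.length : Int) + 1 = (((pre ++ [y]).length : Nat) : Int) := by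
              simp
            have harg2 : (pre.length : Int) + ((x :: (m ++ [y])).length : Int) - 1 - 1
                = (((pre ++ [y]).length : Nat) : Int) + (m.length : Int) - 1 := by
              simp; push_cast; ring
            rw [harg1, harg2]
            have := ih m.length (by simp at hlen ⊢; omega) m (pre ++ [y]) ([x] ++ post) rfl
            rw [this]
            have : rv (x :: (m ++ [y])) = y :: rv m ++ [x] := rv_both x y m hx hy
            simp [this]
          · -- y not vowel: right -= 1
            rw [if_neg (by simp [hy]), if_neg (by simp [hx])]
            have hre : pre ++ (x :: (m ++ [y])) ++ post = pre ++ (x :: m) ++ ([y] ++ post) := by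
              simp
            have harg : (pre.length : Int) + ((x :: (m ++ [y])).length : Int) - 1 - 1
                = (pre.length : Int) + ((x :: m).length : Int) - 1 := by simp; push_cast; ring
            rw [hre, harg]
            rw [ih (x :: m).length (by simp at hlen ⊢; omega) (x :: m) pre ([y] ++ post) rfl]
            have : rv (x :: (m ++ [y])) = rv (x :: m) ++ [y] := by
              have := rv_snoc_nonvowel y (x :: m) hy
              simpa using this
            simp [this]
        · -- x not vowel: left += 1
          rw [if_neg (by simp [hx]), if_pos (by simp [hx])]
          have hre : pre ++ (x :: (m ++ [y])) ++ post = (pre ++ [x]) ++ (m ++ [y]) ++ post := by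
            simp
          have harg1 : (pre.length : Int) + 1 = (((pre ++ [x]).length : Nat) : Int) := by simp
          have harg2 : (pre.length : Int) + ((x :: (m ++ [y])).length : Int) - 1
              = (((pre ++ [x]).length : Nat) : Int) + ((m ++ [y]).length : Int) - 1 := by
            simp; push_cast; ring
          rw [hre, harg1, harg2]
          rw [ih (m ++ [y]).length (by simp at hlen ⊢; omega) (m ++ [y]) (pre ++ [x]) post rfl]
          have : rv (x :: (m ++ [y])) = x :: rv (m ++ [y]) := rv_cons_nonvowel x _ hx
          simp [this]

theorem getLastD_eq_headD_reverse (l : List Char) (c : Char) : l.getLastD c = l.reverse.headD c := by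
  rw [List.getLastD_eq_getLast?, List.getLast?_eq_head?_reverse]
  cases l.reverse <;> simp

-- B's stack loop pops from the END of stack = takes from the FRONT of stack.reverse
theorem stackLoop_eq (cs : List Char) : ∀ (st out : List Char),
    rovStackLoop cs st out = out ++ core cs st.reverse := by
  induction cs with
  | nil => intro st out; simp [rovStackLoop, core]
  | cons c rest ih =>
    intro st out
    by_cases h : isVowel c
    · simp only [rovStackLoop, h, if_true, ih, core]
      rw [getLastD_eq_headD_reverse, List.tail_reverse.symm]
      simp
    · simp [rovStackLoop, h, ih, core]

-- ===== VERDICT (by name: the statement is the Claim_ definition above) =====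
theorem reverse_only_vowels_spec : Claim_equal_reverse_only_vowels := by
  intro s _
  unfold Spec_reverse_only_vowels reverse_only_vowels reverse_only_vowels_alt
  have hA : rovLoop s.toList 0 ((s.toList.length : Int) - 1) = rv s.toList := by
    have := loop_eq s.toList.length s.toList [] [] rfl
    simpa using this
  have hB : rovStackLoop s.toList (s.toList.filter isVowel) [] = rv s.toList := by
    rw [stackLoop_eq]
    simp [rv]
  rw [hA, hB]
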